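-- pv_equiv track=rewrite | github.com/sooo19/coding-test-study | [python] 프로그래머스/프로그래머스 강의/[PCCP모의고사#2_02]신입사원 교육.py | solution
-- ===== SOURCE A (Python) =====
-- import heapq
--
-- def solution(ability, number):
--     queue = []
--     for a in ability:
--         heapq.heappush(queue, a)
--
--     for _ in range(number):
--         x = heapq.heappop(queue)
--         y = heapq.heappop(queue)
--         new = x + y
--         heapq.heappush(queue, new)
--         heapq.heappush(queue, new)
--
--     return sum(queue)
-- ===== SOURCE B (Python) =====
-- def solution(ability, number):
--     values = list(ability)
--     for _ in range(number):
--         x = min(values)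
--         values.remove(x)
--         y = min(values)
--         values.remove(y)
--         new = x + y
--         values.append(new)
--         values.append(new)
--     return sum(values)
-- ===== Notes on version B (the rewrite author's own statement) =====
-- stated objective: alternative
-- what changed: Replaces the binary heap (heapq heappush/heappop with sift-up/sift-down) by a plain unsorted list from which each round's two minima are found by min() and removed by remove(), with the merged value appended twice.
import Mathlib
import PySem

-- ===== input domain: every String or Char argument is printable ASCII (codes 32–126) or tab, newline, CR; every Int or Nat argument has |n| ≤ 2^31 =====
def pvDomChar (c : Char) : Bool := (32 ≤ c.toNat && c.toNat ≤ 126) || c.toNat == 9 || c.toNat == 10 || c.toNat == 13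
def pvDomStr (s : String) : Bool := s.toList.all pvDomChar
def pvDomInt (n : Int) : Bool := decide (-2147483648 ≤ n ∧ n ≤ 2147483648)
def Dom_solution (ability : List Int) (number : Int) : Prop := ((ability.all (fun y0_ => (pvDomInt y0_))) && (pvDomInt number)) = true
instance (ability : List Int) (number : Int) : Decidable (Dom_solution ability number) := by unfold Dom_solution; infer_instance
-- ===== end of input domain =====

-- B replaces A's binary heap by a plain list scanned for its minimum each round (min/remove
-- instead of heappush/heappop): same greedy merge, different data representation ('alternative').

-- ===== PORT A =====
-- A builds a heap with heapq; the heapq library's heappush/heappop are ported literally from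
-- CPython's pure-Python heapq implementation (_siftdown / _siftup) below.

-- heapq._siftdown(heap, startpos, pos): bubble the (virtual) newitem from pos up toward startpos.
-- CPython mutates heap[pos] in place and writes newitem at the final pos; here the loop returns
-- the array together with the final pos and the caller performs that last write.
def pvSiftdown (newitem : Int) (startpos : Nat) (h : List Int) (pos : Nat) : List Int × Nat :=
  if _hgt : startpos < pos then
    let parentpos := (pos - 1) / 2
    let parent := h.getD parentpos 0
    if newitem < parent then
      pvSiftdown newitem startpos (h.set pos parent) parentpos
    else (h, pos)
  else (h, pos)
termination_by pos
decreasing_by omega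

-- heapq._siftup, first phase: move the smaller child up until reaching a leaf
def pvSiftupDescend (endpos : Nat) (h : List Int) (pos : Nat) : List Int × Nat :=
  if _hc : 2 * pos + 1 < endpos then
    let childpos := 2 * pos + 1
    let rightpos := childpos + 1
    let c := if rightpos < endpos ∧ ¬ (h.getD childpos 0 < h.getD rightpos 0) then rightpos else childpos
    pvSiftupDescend endpos (h.set pos (h.getD c 0)) c
  else (h, pos)
termination_by endpos - pos
decreasing_by split <;> omega

-- heapq._siftup(heap, pos): descend to a leaf, put newitem there, then _siftdown back toward pos
def pvSiftup (h : List Int) (pos : Nat) : List Int :=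
  let newitem := h.getD pos 0
  let r1 := pvSiftupDescend h.length h pos
  let h2 := r1.1.set r1.2 newitem
  let r2 := pvSiftdown newitem pos h2 r1.2
  r2.1.set r2.2 newitem

-- heapq.heappush
def pvHeappush (h : List Int) (item : Int) : List Int :=
  let h1 := h ++ [item]
  let r := pvSiftdown item 0 h1 (h1.length - 1)
  r.1.set r.2 item

-- heapq.heappop: pop the last element; none = IndexError on an empty heap
def pvHeappop (h : List Int) : Option (Int × List Int) :=
  match PySem.List.pop? h (-1) with
  | none => none
  | some (lastelt, rest) =>
    if rest.isEmpty then some (lastelt, rest)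
    else some (rest.getD 0 0, pvSiftup (rest.set 0 lastelt) 0)

-- the 'for _ in range(number)' loop of A; none = a heappop raised IndexError
def pvPopPhase (q : List Int) (n : Nat) : Option (List Int) :=
  match n with
  | 0 => some q
  | n + 1 =>
    match pvHeappop q with
    | none => none
    | some (x, q1) =>
      match pvHeappop q1 with
      | none => none
      | some (y, q2) => pvPopPhase (pvHeappush (pvHeappush q2 (x + y)) (x + y)) n

def solution (ability : List Int) (number : Int) : Int :=
  let queue := ability.foldl pvHeappush []
  match pvPopPhase queue number.toNat with
  | some q => q.sum
  | none => 0

-- ===== PORT B =====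
-- the 'for _ in range(number)' loop of B; none = min() raised ValueError on an empty list
def pvAltLoop (l : List Int) (n : Nat) : Option (List Int) :=
  match n with
  | 0 => some l
  | n + 1 =>
    match PySem.List.min? l (fun v => v) with
    | none => none
    | some x =>
      match PySem.List.remove? l x with
      | none => none
      | some l1 =>
        match PySem.List.min? l1 (fun v => v) with
        | none => none
        | some y =>
          match PySem.List.remove? l1 y with
          | none => none
          | some l2 => pvAltLoop ((l2 ++ [x + y]) ++ [x + y]) n

def solution_alt (ability : List Int) (number : Int) : Int :=
  match pvAltLoop ability number.toNat with
  | some l => l.sum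
  | none => 0

-- ===== PRECONDITION & SPEC =====
-- A raises IndexError (heappop from an empty heap) exactly when number > 0 and ability has
-- fewer than 2 elements (the heap size is invariant across an iteration, so only the first
-- iteration can fail); Pre_ excludes exactly those inputs.
def Pre_solution (ability : List Int) (number : Int) : Prop := 0 < number → 2 ≤ ability.length
instance (ability : List Int) (number : Int) : Decidable (Pre_solution ability number) := by unfold Pre_solution; infer_instance

def pvWitness_solution : List Int × Int := ([5, 3, 4, 1, 2], 3)

def Spec_solution (ability : List Int) (number : Int) (out : Int) : Prop := out = solution_alt ability number
instance (ability : List Int) (number : Int) (out : Int) : Decidable (Spec_solution ability number out) := by unfold Spec_solution; infer_instance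

-- ===== CLAIM (what is proved, stated in full; the proofs are below) =====
def Claim_equal_solution : Prop := ∀ (ability : List Int) (number : Int), Dom_solution ability number → Pre_solution ability number → Spec_solution ability number (solution ability number)

-- ===== LEMMAS AND PROOFS =====

-- the binary-heap (min-heap) property on an array, stated with getD
def pvHVal (h : List Int) : Prop :=
  ∀ i j, j < h.length → (j = 2 * i + 1 ∨ j = 2 * i + 2) → h.getD i 0 ≤ h.getD j 0

-- invariant of the bubble-up loop pvSiftdown (hole at p, virtual content x, startpos 0):
-- (1) heap property on all pairs avoiding the hole, (2) the hole's parent is ≤ the hole's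
-- children, (3) x is ≤ the hole's children
def pvBup (x : Int) (h : List Int) (p : Nat) : Prop :=
  (∀ i j, j < h.length → (j = 2 * i + 1 ∨ j = 2 * i + 2) → i ≠ p → j ≠ p → h.getD i 0 ≤ h.getD j 0) ∧
  (∀ j, j < h.length → (j = 2 * p + 1 ∨ j = 2 * p + 2) → 0 < p → h.getD ((p - 1) / 2) 0 ≤ h.getD j 0) ∧
  (∀ j, j < h.length → (j = 2 * p + 1 ∨ j = 2 * p + 2) → x ≤ h.getD j 0)

-- invariant of the descend loop pvSiftupDescend: conjuncts (1) and (2) of pvBup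
def pvDesc (h : List Int) (p : Nat) : Prop :=
  (∀ i j, j < h.length → (j = 2 * i + 1 ∨ j = 2 * i + 2) → i ≠ p → j ≠ p → h.getD i 0 ≤ h.getD j 0) ∧
  (∀ j, j < h.length → (j = 2 * p + 1 ∨ j = 2 * p + 2) → 0 < p → h.getD ((p - 1) / 2) 0 ≤ h.getD j 0)

theorem pv_getD_set_self (l : List Int) {i : Nat} (h : i < l.length) (v : Int) :
    (l.set i v).getD i 0 = v := by
  simp [List.getD, h]

theorem pv_getD_set_ne (l : List Int) {i j : Nat} (h : i ≠ j) (v : Int) :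
    (l.set i v).getD j 0 = l.getD j 0 := by
  simp [List.getD, h]

theorem pv_getD_mem (l : List Int) {i : Nat} (h : i < l.length) : l.getD i 0 ∈ l := by
  rw [List.getD_eq_getElem l 0 h]; exact List.getElem_mem h

theorem pv_set_last (l : List Int) (x v : Int) : (l ++ [x]).set l.length v = l ++ [v] := by
  induction l with
  | nil => rfl
  | cons a t ih => simp [ih]

theorem pv_cons_set_perm (D : List Int) (v : Int) :
    ∀ j, (hj : j < D.length) → (D.getD j 0 :: D.set j v).Perm (v :: D) := by
  induction D with
  | nil => intro j hj; simp at hj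
  | cons d t ih =>
    intro j hj
    cases j with
    | zero => simpa using (List.Perm.swap d v t).symm
    | succ j' =>
      have hj' : j' < t.length := by simpa using hj
      simp only [List.getD_cons_succ, List.set_cons_succ]
      exact ((List.Perm.swap _ _ _).trans ((ih j' hj').cons d)).trans (List.Perm.swap _ _ _)

theorem pv_swap_perm : ∀ (l : List Int) (i j : Nat), i < l.length → j < l.length → i ≠ j →
    ((l.set i (l.getD j 0)).set j (l.getD i 0)).Perm l := by
  intro l
  induction l with
  | nil => intro i j hi _ _; simp at hi
  | cons a t ih =>
    intro i j hi hj hne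
    match i, j with
    | 0, 0 => exact absurd rfl hne
    | 0, j2 + 1 =>
      simp only [List.getD_cons_succ, List.getD_cons_zero, List.set_cons_zero, List.set_cons_succ]
      exact pv_cons_set_perm t a j2 (by simpa using hj)
    | i2 + 1, 0 =>
      simp only [List.getD_cons_succ, List.getD_cons_zero, List.set_cons_succ, List.set_cons_zero]
      exact pv_cons_set_perm t a i2 (by simpa using hi)
    | i2 + 1, j2 + 1 =>
      simp only [List.getD_cons_succ, List.set_cons_succ]
      exact (ih i2 j2 (by simpa using hi) (by simpa using hj) (by omega)).cons a

theorem pv_root_le (h : List Int) (hv : pvHVal h) :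
    ∀ j, j < h.length → h.getD 0 0 ≤ h.getD j 0 := by
  intro j
  induction j using Nat.strong_induction_on with
  | _ j ih =>
    intro hj
    rcases Nat.eq_zero_or_pos j with hj0 | hj0
    · subst hj0; exact le_refl _
    · have hpar : j = 2 * ((j - 1) / 2) + 1 ∨ j = 2 * ((j - 1) / 2) + 2 := by omega
      exact le_trans (ih ((j - 1) / 2) (by omega) (by omega)) (hv _ _ hj hpar)

theorem pvSiftdown_spec (x : Int) : ∀ (p : Nat) (h : List Int), p < h.length → pvBup x h p →
    (pvSiftdown x 0 h p).1.length = h.length ∧ (pvSiftdown x 0 h p).2 < h.length ∧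
    pvHVal ((pvSiftdown x 0 h p).1.set (pvSiftdown x 0 h p).2 x) ∧
    ((pvSiftdown x 0 h p).1.set (pvSiftdown x 0 h p).2 x).Perm (h.set p x) := by
  intro p h
  fun_induction pvSiftdown x 0 h p with
  | case1 h p hgt pp parent hlt ih =>
    intro hp inv
    obtain ⟨i1, i2, i3⟩ := inv
    have hppE : pp = (p - 1) / 2 := rfl
    have hparE : parent = h.getD pp 0 := rfl
    have hpplt : pp < p := by omega
    have hchild : p = 2 * pp + 1 ∨ p = 2 * pp + 2 := by omega
    have hlen : (h.set p parent).length = h.length := by simp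
    -- the new hole pp satisfies the bubble-up invariant
    have inv2 : pvBup x (h.set p parent) pp := by
      refine ⟨?_, ?_, ?_⟩
      · intro i j hj hcj hipp hjpp
        rw [hlen] at hj
        by_cases hip : i = p
        · rw [hip] at hcj ⊢
          have hjne : j ≠ p := by omega
          rw [pv_getD_set_self h hp, pv_getD_set_ne h (fun e => hjne e.symm)]
          rw [hparE, hppE]
          exact i2 j hj hcj hgt
        · have hjp : j ≠ p := by
            intro e; rw [e] at hcj; rw [hppE] at hipp; omega
          rw [pv_getD_set_ne h (fun e => hip e.symm), pv_getD_set_ne h (fun e => hjp e.symm)]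
          exact i1 i j hj hcj hip hjp
      · intro j hj hcj hpp0
        have hgp : pp = 2 * ((pp - 1) / 2) + 1 ∨ pp = 2 * ((pp - 1) / 2) + 2 := by omega
        have hgpne : (pp - 1) / 2 ≠ p := by omega
        rw [hlen] at hj
        rw [pv_getD_set_ne h (fun e => hgpne e.symm)]
        by_cases hjp : j = p
        · rw [hjp, pv_getD_set_self h hp, hparE]
          exact i1 _ pp (by omega) hgp (by omega) (by omega)
        · rw [pv_getD_set_ne h (fun e => hjp e.symm)]
          exact le_trans (i1 _ pp (by omega) hgp (by omega) (by omega))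
            (i1 pp j hj (by rw [hppE] at hcj ⊢; omega) (by omega) hjp)
      · intro j hj hcj
        rw [hlen] at hj
        by_cases hjp : j = p
        · rw [hjp, pv_getD_set_self h hp]
          exact le_of_lt hlt
        · rw [pv_getD_set_ne h (fun e => hjp e.symm)]
          refine le_trans (le_of_lt hlt) ?_
          rw [hparE]
          exact i1 pp j hj (by rw [hppE] at hcj ⊢; omega) (by omega) hjp
    obtain ⟨c1, c2, c3, c4⟩ := ih (by rw [hlen]; omega) inv2
    rw [hlen] at c1 c2
    refine ⟨c1, c2, c3, c4.trans ?_⟩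
    -- (h.set p parent).set pp x is a transposition of h.set p x
    have e1 : (h.set p x).getD pp 0 = parent := by
      rw [pv_getD_set_ne h (show p ≠ pp by omega), hparE]
    have e2 : (h.set p x).getD p 0 = x := pv_getD_set_self h hp x
    have hsw := pv_swap_perm (h.set p x) p pp (by simpa using hp) (by simp; omega) (by omega)
    rw [e1, e2, List.set_set] at hsw
    exact hsw
  | case2 h p hgt pp parent hnlt =>
    intro hp inv
    obtain ⟨i1, i2, i3⟩ := inv
    have hppE : pp = (p - 1) / 2 := rfl
    have hparE : parent = h.getD pp 0 := rfl
    refine ⟨rfl, hp, ?_, List.Perm.refl _⟩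
    intro i j hj hcj
    rw [List.length_set] at hj
    by_cases hip : i = p
    · rw [hip] at hcj ⊢
      have hjne : j ≠ p := by omega
      rw [pv_getD_set_self h hp, pv_getD_set_ne h (fun e => hjne e.symm)]
      exact i3 j hj hcj
    · by_cases hjp : j = p
      · rw [hjp] at hcj ⊢
        have hieq : i = (p - 1) / 2 := by omega
        rw [pv_getD_set_ne h (fun e => hip e.symm), pv_getD_set_self h hp, hieq]
        have hle := not_lt.mp hnlt
        rw [hparE, hppE] at hle
        exact hle
      · rw [pv_getD_set_ne h (fun e => hip e.symm), pv_getD_set_ne h (fun e => hjp e.symm)]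
        exact i1 i j hj hcj hip hjp
  | case3 h p hngt =>
    intro hp inv
    obtain ⟨i1, i2, i3⟩ := inv
    have hp0 : p = 0 := by omega
    refine ⟨rfl, hp, ?_, List.Perm.refl _⟩
    intro i j hj hcj
    rw [List.length_set] at hj
    by_cases hip : i = p
    · rw [hip] at hcj ⊢
      have hjne : j ≠ p := by omega
      rw [pv_getD_set_self h hp, pv_getD_set_ne h (fun e => hjne e.symm)]
      exact i3 j hj hcj
    · have hjp : j ≠ p := by omega
      rw [pv_getD_set_ne h (fun e => hip e.symm), pv_getD_set_ne h (fun e => hjp e.symm)]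
      exact i1 i j hj hcj hip hjp

theorem pvSiftupDescend_spec (endpos : Nat) : ∀ (h : List Int) (p : Nat),
    endpos = h.length → p < h.length → pvDesc h p →
    (pvSiftupDescend endpos h p).1.length = h.length ∧
    (pvSiftupDescend endpos h p).2 < h.length ∧
    ¬ (2 * (pvSiftupDescend endpos h p).2 + 1 < h.length) ∧
    pvDesc (pvSiftupDescend endpos h p).1 (pvSiftupDescend endpos h p).2 ∧
    ∀ x, ((pvSiftupDescend endpos h p).1.set (pvSiftupDescend endpos h p).2 x).Perm (h.set p x) := by
  intro h p
  fun_induction pvSiftupDescend endpos h p with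
  | case1 h pos hc childpos rightpos c ih =>
    intro hE hpos inv
    have hcpE : childpos = 2 * pos + 1 := rfl
    have hrpE : rightpos = childpos + 1 := rfl
    have hcE : c = if rightpos < endpos ∧ ¬ (h.getD childpos 0 < h.getD rightpos 0) then rightpos else childpos := rfl
    have hcchild : c = 2 * pos + 1 ∨ c = 2 * pos + 2 := by
      rw [hcE]; split <;> omega
    have hcRange : c < endpos := by
      rw [hcE]; split
      · rename_i hcond; exact hcond.1
      · omega
    have hposc : pos < c := by omega
    have hsel : ∀ j, j < endpos → (j = 2 * pos + 1 ∨ j = 2 * pos + 2) →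
        h.getD c 0 ≤ h.getD j 0 := by
      intro j hj hcj
      rw [hcE]; split
      all_goals rename_i hcond
      · rcases hcj with hj1 | hj2
        · rw [hj1, ← hcpE]; exact not_lt.mp hcond.2
        · rw [hj2]
      · rcases hcj with hj1 | hj2
        · rw [hj1, ← hcpE]
        · have hrin : rightpos < endpos := by omega
          have hlt : h.getD childpos 0 < h.getD rightpos 0 := by
            by_contra hnl
            exact hcond ⟨hrin, hnl⟩
          rw [hj2, ← show rightpos = 2 * pos + 2 by omega]
          exact le_of_lt hlt
    obtain ⟨i1, i2⟩ := inv
    have hlen : (h.set pos (h.getD c 0)).length = h.length := by simp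
    have inv2 : pvDesc (h.set pos (h.getD c 0)) c := by
      refine ⟨?_, ?_⟩
      · intro i j hj hcj hic hjc
        rw [hlen] at hj
        by_cases hip : i = pos
        · rw [hip] at hcj ⊢
          rw [pv_getD_set_self h hpos, pv_getD_set_ne h (show pos ≠ j by omega)]
          exact hsel j (by omega) hcj
        · by_cases hjp : j = pos
          · rw [hjp] at hcj ⊢
            rw [pv_getD_set_ne h (fun e => hip e.symm), pv_getD_set_self h hpos]
            have hieq : i = (pos - 1) / 2 := by omega
            rw [hieq]
            exact i2 c (by omega) hcchild (by omega)
          · rw [pv_getD_set_ne h (fun e => hip e.symm), pv_getD_set_ne h (fun e => hjp e.symm)]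
            exact i1 i j hj hcj hip hjp
      · intro j hj hcj hc0
        rw [hlen] at hj
        have hjne : j ≠ pos := by omega
        rw [show (c - 1) / 2 = pos by omega, pv_getD_set_self h hpos,
          pv_getD_set_ne h (fun e => hjne e.symm)]
        exact i1 c j hj hcj (by omega) hjne
    obtain ⟨c1, c2, c3, c4, c5⟩ := ih (by rw [hlen]; exact hE) (by rw [hlen]; omega) inv2
    rw [hlen] at c1 c2 c3
    refine ⟨c1, c2, c3, c4, ?_⟩
    intro x
    refine (c5 x).trans ?_
    have e1 : (h.set pos x).getD c 0 = h.getD c 0 :=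
      pv_getD_set_ne h (show pos ≠ c by omega) x
    have e2 : (h.set pos x).getD pos 0 = x := pv_getD_set_self h hpos x
    have hsw := pv_swap_perm (h.set pos x) pos c (by simpa using hpos) (by simp; omega) (by omega)
    rw [e1, e2, List.set_set] at hsw
    exact hsw
  | case2 h pos hnc =>
    intro hE hpos inv
    exact ⟨rfl, hpos, by omega, inv, fun x => List.Perm.refl _⟩

theorem pv_set_root (h : List Int) (hne : h ≠ []) : h.set 0 (h.getD 0 0) = h := by
  cases h with
  | nil => exact absurd rfl hne
  | cons a t => simp

theorem pvSiftup_spec (h : List Int) (hne : h ≠ []) (hd : pvDesc h 0) :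
    pvHVal (pvSiftup h 0) ∧ (pvSiftup h 0).Perm h := by
  have hp0 : 0 < h.length := List.length_pos_of_ne_nil hne
  obtain ⟨c1, c2, c3, c4, c5⟩ := pvSiftupDescend_spec h.length h 0 rfl hp0 hd
  have hlen2 : ((pvSiftupDescend h.length h 0).1.set (pvSiftupDescend h.length h 0).2 (h.getD 0 0)).length = h.length := by
    rw [List.length_set]; exact c1
  have hbup : pvBup (h.getD 0 0)
      ((pvSiftupDescend h.length h 0).1.set (pvSiftupDescend h.length h 0).2 (h.getD 0 0))
      (pvSiftupDescend h.length h 0).2 := by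
    refine ⟨?_, ?_, ?_⟩
    · intro i j hj hcj hi hj2
      rw [hlen2] at hj
      rw [pv_getD_set_ne _ (fun e => hi e.symm), pv_getD_set_ne _ (fun e => hj2 e.symm)]
      exact c4.1 i j (by rw [c1]; exact hj) hcj hi hj2
    · intro j hj hcj _
      rw [hlen2] at hj
      omega
    · intro j hj hcj
      rw [hlen2] at hj
      omega
  obtain ⟨d1, d2, d3, d4⟩ := pvSiftdown_spec (h.getD 0 0) (pvSiftupDescend h.length h 0).2 _
    (by rw [hlen2]; exact c2) hbup
  constructor
  · exact d3
  · refine d4.trans ?_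
    rw [List.set_set]
    exact (c5 (h.getD 0 0)).trans (by rw [pv_set_root h hne])

theorem pvHeappush_spec (h : List Int) (x : Int) (hv : pvHVal h) :
    pvHVal (pvHeappush h x) ∧ (pvHeappush h x).Perm (x :: h) := by
  have hlen1 : (h ++ [x]).length - 1 = h.length := by simp
  have hp : h.length < (h ++ [x]).length := by simp
  have inv : pvBup x (h ++ [x]) h.length := by
    refine ⟨?_, ?_, ?_⟩
    · intro i j hj hcj hip hjp
      have hj' : j < h.length := by
        simp only [List.length_append, List.length_cons, List.length_nil] at hj
        omega
      have hi' : i < h.length := by omega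
      rw [List.getD_append _ _ _ _ hi', List.getD_append _ _ _ _ hj']
      exact hv i j hj' hcj
    · intro j hj hcj _
      simp only [List.length_append, List.length_cons, List.length_nil] at hj
      omega
    · intro j hj hcj
      simp only [List.length_append, List.length_cons, List.length_nil] at hj
      omega
  obtain ⟨c1, c2, c3, c4⟩ := pvSiftdown_spec x h.length (h ++ [x]) hp inv
  constructor
  · simp only [pvHeappush, hlen1]
    exact c3
  · simp only [pvHeappush, hlen1]
    refine c4.trans ?_
    rw [pv_set_last]
    exact List.perm_append_singleton x h

theorem pvHeappop_spec (h : List Int) (hv : pvHVal h) (hne : h ≠ []) :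
    ∃ hr, pvHeappop h = some (h.getD 0 0, hr) ∧ pvHVal hr ∧ (h.getD 0 0 :: hr).Perm h := by
  have hsp : h.dropLast ++ [h.getLast hne] = h := List.dropLast_concat_getLast hne
  rw [← hsp] at hv ⊢
  by_cases hinit : h.dropLast = []
  · rw [hinit]
    refine ⟨[], ?_, ?_, ?_⟩
    · have hpl := PySem.List.pop?_last ([] : List Int) (h.getLast hne)
      simp only [List.nil_append] at hpl
      simp [pvHeappop, hpl]
    · intro i j hj _; simp at hj
    · simp
  · have h0i : 0 < h.dropLast.length := List.length_pos_of_ne_nil hinit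
    have hgd : (h.dropLast ++ [h.getLast hne]).getD 0 0 = h.dropLast.getD 0 0 :=
      List.getD_append _ _ _ _ h0i
    have hsetne : h.dropLast.set 0 (h.getLast hne) ≠ [] := by
      intro hc
      have hlc := congrArg List.length hc
      rw [List.length_set] at hlc
      simp only [List.length_nil] at hlc
      omega
    have hdesc : pvDesc (h.dropLast.set 0 (h.getLast hne)) 0 := by
      refine ⟨?_, ?_⟩
      · intro i j hj hcj hi0 hj0
        rw [List.length_set] at hj
        have hij : i < j := by omega
        rw [pv_getD_set_ne _ (fun e => hi0 e.symm), pv_getD_set_ne _ (fun e => hj0 e.symm)]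
        have := hv i j (by simp only [List.length_append, List.length_cons, List.length_nil]; omega) hcj
        rwa [List.getD_append _ _ _ _ (by omega : i < h.dropLast.length),
          List.getD_append _ _ _ _ hj] at this
      · intro j hj hcj h00
        exact absurd h00 (lt_irrefl 0)
    obtain ⟨hvS, hpS⟩ := pvSiftup_spec _ hsetne hdesc
    refine ⟨pvSiftup (h.dropLast.set 0 (h.getLast hne)) 0, ?_, hvS, ?_⟩
    · simp only [pvHeappop, PySem.List.pop?_last, List.isEmpty_iff, hinit, hgd]
      simp
    · rw [hgd]
      refine (hpS.cons _).trans ?_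
      cases hd : h.dropLast with
      | nil => exact absurd hd hinit
      | cons a t =>
        simp only [List.getD_cons_zero, List.set_cons_zero, List.cons_append]
        exact ((List.perm_append_singleton (h.getLast hne) t).symm.cons a)

theorem pv_min_eq (q l : List Int) (hv : pvHVal q) (hp : q.Perm l) (hne : q ≠ []) :
    PySem.List.min? l (fun v => v) = some (q.getD 0 0) := by
  cases hm : PySem.List.min? l (fun v => v) with
  | none =>
    exact absurd (List.Perm.eq_nil (((PySem.List.min?_eq_none_iff l _).mp hm) ▸ hp)) hne
  | some m =>
    have hq0 : 0 < q.length := List.length_pos_of_ne_nil hne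
    have hmq : m ∈ q := hp.mem_iff.mpr (PySem.List.min?_mem hm)
    have hroot_l : q.getD 0 0 ∈ l := hp.mem_iff.mp (pv_getD_mem q hq0)
    have h1 : m ≤ q.getD 0 0 := by simpa using PySem.List.min?_isMin hm _ hroot_l
    obtain ⟨k, hk, hkm⟩ := List.getElem_of_mem hmq
    have h2 : q.getD 0 0 ≤ m := by
      have := pv_root_le q hv k hk
      rwa [List.getD_eq_getElem q 0 hk, hkm] at this
    rw [le_antisymm h1 h2]

theorem pvLoop_spec (n : Nat) : ∀ q l : List Int, pvHVal q → q.Perm l → 2 ≤ q.length →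
    ∃ qr lr, pvPopPhase q n = some qr ∧ pvAltLoop l n = some lr ∧ qr.Perm lr := by
  induction n with
  | zero => intro q l hv hp _; exact ⟨q, l, rfl, rfl, hp⟩
  | succ n ih =>
    intro q l hv hp hlen
    have hqne : q ≠ [] := by intro hc; rw [hc] at hlen; simp at hlen
    obtain ⟨q1, hpop1, hv1, hperm1⟩ := pvHeappop_spec q hv hqne
    have hmin1 : PySem.List.min? l (fun v => v) = some (q.getD 0 0) := pv_min_eq q l hv hp hqne
    have hxl : q.getD 0 0 ∈ l := hp.mem_iff.mp (pv_getD_mem q (List.length_pos_of_ne_nil hqne))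
    have hrem1 : PySem.List.remove? l (q.getD 0 0) = some (l.erase (q.getD 0 0)) :=
      PySem.List.remove?_eq_some_erase l _ hxl
    have hq1l : q1.Perm (l.erase (q.getD 0 0)) :=
      List.Perm.cons_inv (hperm1.trans (hp.trans (List.perm_cons_erase hxl)))
    have hlen1 : q1.length + 1 = q.length := by simpa using hperm1.length_eq
    have hq1ne : q1 ≠ [] := by
      intro hc; rw [hc] at hlen1; simp at hlen1; omega
    obtain ⟨q2, hpop2, hv2, hperm2⟩ := pvHeappop_spec q1 hv1 hq1ne
    have hmin2 : PySem.List.min? (l.erase (q.getD 0 0)) (fun v => v) = some (q1.getD 0 0) :=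
      pv_min_eq q1 _ hv1 hq1l hq1ne
    have hyl : q1.getD 0 0 ∈ l.erase (q.getD 0 0) :=
      hq1l.mem_iff.mp (pv_getD_mem q1 (List.length_pos_of_ne_nil hq1ne))
    have hrem2 : PySem.List.remove? (l.erase (q.getD 0 0)) (q1.getD 0 0)
        = some ((l.erase (q.getD 0 0)).erase (q1.getD 0 0)) :=
      PySem.List.remove?_eq_some_erase _ _ hyl
    have hq2l : q2.Perm ((l.erase (q.getD 0 0)).erase (q1.getD 0 0)) :=
      List.Perm.cons_inv (hperm2.trans (hq1l.trans (List.perm_cons_erase hyl)))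
    obtain ⟨hv3, hperm3⟩ := pvHeappush_spec q2 (q.getD 0 0 + q1.getD 0 0) hv2
    obtain ⟨hv4, hperm4⟩ :=
      pvHeappush_spec (pvHeappush q2 (q.getD 0 0 + q1.getD 0 0)) (q.getD 0 0 + q1.getD 0 0) hv3
    have hqq : (pvHeappush (pvHeappush q2 (q.getD 0 0 + q1.getD 0 0)) (q.getD 0 0 + q1.getD 0 0)).Perm
        ((((l.erase (q.getD 0 0)).erase (q1.getD 0 0) ++ [q.getD 0 0 + q1.getD 0 0])
          ++ [q.getD 0 0 + q1.getD 0 0])) := by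
      refine (hperm4.trans ((hperm3.cons _).trans ((hq2l.cons _).cons _))).trans ?_
      exact (((List.perm_append_singleton _ _).trans
        (((List.perm_append_singleton _ _).cons _)))).symm
    have hlen2 : q2.length + 1 = q1.length := by simpa using hperm2.length_eq
    have hlenq : 2 ≤ (pvHeappush (pvHeappush q2 (q.getD 0 0 + q1.getD 0 0)) (q.getD 0 0 + q1.getD 0 0)).length := by
      have e4 := hperm4.length_eq
      have e3 := hperm3.length_eq
      simp only [List.length_cons] at e4 e3
      omega
    obtain ⟨qr, lr, hqr, hlr, hperm5⟩ := ih _ _ hv4 hqq hlenq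
    refine ⟨qr, lr, ?_, ?_, hperm5⟩
    · simp only [pvPopPhase, hpop1, hpop2]; exact hqr
    · simp only [pvAltLoop, hmin1, hrem1, hmin2, hrem2]; exact hlr

theorem pvBuild_spec (xs : List Int) : ∀ acc : List Int, pvHVal acc →
    pvHVal (xs.foldl pvHeappush acc) ∧ (xs.foldl pvHeappush acc).Perm (acc ++ xs) := by
  induction xs with
  | nil => intro acc hacc; exact ⟨hacc, by simp⟩
  | cons x xs ih =>
    intro acc hacc
    obtain ⟨hv1, hp1⟩ := pvHeappush_spec acc x hacc
    obtain ⟨hv2, hp2⟩ := ih (pvHeappush acc x) hv1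
    refine ⟨hv2, ?_⟩
    simp only [List.foldl_cons]
    exact hp2.trans ((hp1.append_right xs).trans List.perm_middle.symm)

-- ===== VERDICT (by name: the statement is the Claim_ definition above) =====
theorem solution_spec : Claim_equal_solution := by
  intro ability number hdom hpre
  unfold Spec_solution
  simp only [solution, solution_alt]
  obtain ⟨hvq, hpq⟩ := pvBuild_spec ability [] (by intro i j hj _; simp at hj)
  have hpq2 : (ability.foldl pvHeappush []).Perm ability := by simpa using hpq
  cases hn : number.toNat with
  | zero => simp only [pvPopPhase, pvAltLoop]; exact hpq2.sum_eq
  | succ n =>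
    have hnum : 0 < number := by omega
    have hlen : 2 ≤ (ability.foldl pvHeappush []).length := by
      rw [hpq2.length_eq]; exact hpre hnum
    obtain ⟨qr, lr, hq, hl, hperm⟩ := pvLoop_spec (n + 1) _ ability hvq hpq2 hlen
    rw [hq, hl]
    exact hperm.sum_eq
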